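-- pv_equiv track=rewrite | github.com/Herbin-Clement/csi3d-squeeze | decimate.py | check_third_cond
-- ===== SOURCE A (Python) =====
-- def check_third_cond(v1, v2, neighbors_v1, neighbors_v2, collapsed_edges):
--     """
--     Check the third condition
--     """
--     valid = True
--     # Troisième condition
--     for w1 in neighbors_v1:
--         if w1 != v2:
--             for w2 in neighbors_v2:
--                 if w2 != v1:
--                     if sorted([w1,w2]) in collapsed_edges:
--                         valid = False
--                         break
--     return valid
-- ===== SOURCE B (Python) =====
-- def check_third_cond(v1, v2, neighbors_v1, neighbors_v2, collapsed_edges):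
--     """
--     Check the third condition
--     """
--     s1 = set(neighbors_v1) - {v2}
--     s2 = set(neighbors_v2) - {v1}
--     for e in collapsed_edges:
--         if len(e) == 2:
--             x, y = e
--             if x <= y and ((x in s1 and y in s2) or (y in s1 and x in s2)):
--                 return False
--     return True
-- ===== Notes on version B (the rewrite author's own statement) =====
-- stated objective: faster
-- what changed: Instead of scanning collapsed_edges once per neighbor pair (|N1|*|N2| list scans), B builds the two neighbor sets once and makes a single pass over collapsed_edges with O(1) set lookups per edge.
import Mathlib
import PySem

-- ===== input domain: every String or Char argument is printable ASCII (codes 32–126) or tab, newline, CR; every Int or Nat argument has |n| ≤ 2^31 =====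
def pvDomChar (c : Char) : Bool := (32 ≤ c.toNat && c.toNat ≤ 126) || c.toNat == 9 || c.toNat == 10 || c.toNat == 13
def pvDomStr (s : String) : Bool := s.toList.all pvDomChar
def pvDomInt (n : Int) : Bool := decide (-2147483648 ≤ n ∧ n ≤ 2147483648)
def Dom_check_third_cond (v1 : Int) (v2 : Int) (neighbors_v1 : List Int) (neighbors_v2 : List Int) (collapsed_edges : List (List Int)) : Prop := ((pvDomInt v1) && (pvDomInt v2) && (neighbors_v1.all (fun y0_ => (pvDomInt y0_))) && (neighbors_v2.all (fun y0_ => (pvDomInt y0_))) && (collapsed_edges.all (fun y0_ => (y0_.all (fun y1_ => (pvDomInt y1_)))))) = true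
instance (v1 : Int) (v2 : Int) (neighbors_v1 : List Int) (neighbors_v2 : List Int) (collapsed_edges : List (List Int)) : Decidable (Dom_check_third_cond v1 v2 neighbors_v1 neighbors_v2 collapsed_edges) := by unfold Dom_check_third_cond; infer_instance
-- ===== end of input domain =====

-- B replaces A's scan of collapsed_edges per neighbor pair by two neighbor sets built once and a single pass over collapsed_edges (objective: faster).


-- ===== PORT A =====
-- inner loop 'for w2 in neighbors_v2: …' of A, with its break (returns the new 'valid')
def pvInnerA (v1 : Int) (w1 : Int) (n2 : List Int) (ce : List (List Int)) (valid : Bool) : Bool :=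
  match n2 with
  | [] => valid
  | w2 :: rest =>
    if w2 ≠ v1 then
      if PySem.List.sorted [w1, w2] (fun x => x) false ∈ ce then false
      else pvInnerA v1 w1 rest ce valid
    else pvInnerA v1 w1 rest ce valid

def check_third_cond (v1 : Int) (v2 : Int) (neighbors_v1 : List Int) (neighbors_v2 : List Int) (collapsed_edges : List (List Int)) : Bool :=
  neighbors_v1.foldl
    (fun valid w1 => if w1 ≠ v2 then pvInnerA v1 w1 neighbors_v2 collapsed_edges valid else valid)
    true

-- ===== PORT B =====
-- single pass over collapsed_edges with early return (Source B's loop)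
def pvLoopB (s1 s2 : PySem.Set Int) (ce : List (List Int)) : Bool :=
  match ce with
  | [] => true
  | e :: rest =>
    match e with
    | [x, y] =>
      if x ≤ y && ((PySem.Set.contains s1 x && PySem.Set.contains s2 y) ||
                   (PySem.Set.contains s1 y && PySem.Set.contains s2 x)) then false
      else pvLoopB s1 s2 rest
    | _ => pvLoopB s1 s2 rest

def check_third_cond_alt (v1 : Int) (v2 : Int) (neighbors_v1 : List Int) (neighbors_v2 : List Int) (collapsed_edges : List (List Int)) : Bool :=
  let s1 := PySem.Set.diff (PySem.Set.ofList neighbors_v1) [v2]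
  let s2 := PySem.Set.diff (PySem.Set.ofList neighbors_v2) [v1]
  pvLoopB s1 s2 collapsed_edges

-- ===== PRECONDITION & SPEC =====
def Spec_check_third_cond (v1 : Int) (v2 : Int) (neighbors_v1 : List Int) (neighbors_v2 : List Int) (collapsed_edges : List (List Int)) (out : Bool) : Prop := out = check_third_cond_alt v1 v2 neighbors_v1 neighbors_v2 collapsed_edges
instance (v1 : Int) (v2 : Int) (neighbors_v1 : List Int) (neighbors_v2 : List Int) (collapsed_edges : List (List Int)) (out : Bool) : Decidable (Spec_check_third_cond v1 v2 neighbors_v1 neighbors_v2 collapsed_edges out) := by unfold Spec_check_third_cond; infer_instance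

-- ===== CLAIM (what is proved, stated in full; the proofs are below) =====
def Claim_equal_check_third_cond : Prop := ∀ (v1 : Int) (v2 : Int) (neighbors_v1 : List Int) (neighbors_v2 : List Int) (collapsed_edges : List (List Int)), Dom_check_third_cond v1 v2 neighbors_v1 neighbors_v2 collapsed_edges → Spec_check_third_cond v1 v2 neighbors_v1 neighbors_v2 collapsed_edges (check_third_cond v1 v2 neighbors_v1 neighbors_v2 collapsed_edges)

-- ===== LEMMAS AND PROOFS =====

-- sorted of a two-element list, in closed form
theorem pvSorted_pair (a b : Int) :
    PySem.List.sorted [a, b] (fun x => x) false = if a ≤ b then [a, b] else [b, a] := by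
  rw [PySem.List.sorted_eq_foldl_insertBy]
  by_cases h : a ≤ b
  · simp [List.foldl, PySem.List.insertBy, show ¬ b < a from not_lt.mpr h, h]
  · simp [List.foldl, PySem.List.insertBy, show b < a from lt_of_not_ge h, h]

-- the bad-pair predicate, as one Bool over neighbor pairs
def pvHitPair (v1 v2 : Int) (n2 : List Int) (ce : List (List Int)) (w1 : Int) : Bool :=
  decide (w1 ≠ v2) &&
    n2.any (fun w2 => decide (w2 ≠ v1) && decide (PySem.List.sorted [w1, w2] (fun x => x) false ∈ ce))

theorem pvInnerA_eq (v1 w1 : Int) (n2 : List Int) (ce : List (List Int)) (valid : Bool) :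
    pvInnerA v1 w1 n2 ce valid
      = (valid && !(n2.any (fun w2 => decide (w2 ≠ v1) && decide (PySem.List.sorted [w1, w2] (fun x => x) false ∈ ce)))) := by
  induction n2 with
  | nil => simp [pvInnerA]
  | cons w2 rest ih =>
    by_cases h1 : w2 ≠ v1
    · by_cases h2 : PySem.List.sorted [w1, w2] (fun x => x) false ∈ ce
      · simp [pvInnerA, h1, h2]
      · simp [pvInnerA, h1, h2, ih]
    · have h1' : w2 = v1 := not_not.mp h1
      subst h1'
      simp [pvInnerA, ih]

theorem pvA_eq (v1 v2 : Int) (n1 n2 : List Int) (ce : List (List Int)) :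
    check_third_cond v1 v2 n1 n2 ce = !(n1.any (pvHitPair v1 v2 n2 ce)) := by
  unfold check_third_cond
  suffices h : ∀ (valid : Bool),
      n1.foldl (fun valid w1 => if w1 ≠ v2 then pvInnerA v1 w1 n2 ce valid else valid) valid
        = (valid && !(n1.any (pvHitPair v1 v2 n2 ce))) by
    simpa using h true
  induction n1 with
  | nil => simp
  | cons w1 rest ih =>
    intro valid
    rw [List.foldl_cons]
    by_cases h1 : w1 ≠ v2
    · rw [if_pos h1, ih, pvInnerA_eq]
      simp [pvHitPair, h1, Bool.and_assoc]
    · rw [if_neg h1, ih]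
      have h1' : w1 = v2 := not_not.mp h1
      simp [pvHitPair, h1']

-- the bad-edge predicate, as one Bool over edges
def pvHitEdge (s1 s2 : PySem.Set Int) (e : List Int) : Bool :=
  match e with
  | [x, y] => x ≤ y && ((PySem.Set.contains s1 x && PySem.Set.contains s2 y) ||
                        (PySem.Set.contains s1 y && PySem.Set.contains s2 x))
  | _ => false

theorem pvLoopB_eq (s1 s2 : PySem.Set Int) (ce : List (List Int)) :
    pvLoopB s1 s2 ce = !(ce.any (pvHitEdge s1 s2)) := by
  induction ce with
  | nil => simp [pvLoopB]
  | cons e rest ih =>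
    rw [List.any_cons, Bool.not_or, ← ih]
    match e with
    | [] => simp [pvLoopB, pvHitEdge]
    | [x] => simp [pvLoopB, pvHitEdge]
    | x :: y :: z :: t => simp [pvLoopB, pvHitEdge]
    | [x, y] =>
      cases hcond : (x ≤ y && ((PySem.Set.contains s1 x && PySem.Set.contains s2 y) ||
                   (PySem.Set.contains s1 y && PySem.Set.contains s2 x))) with
      | false => simp only [pvLoopB, pvHitEdge, hcond]; simp
      | true => simp only [pvLoopB, pvHitEdge, hcond]; simp

theorem pvMem_s1 (v : Int) (n : List Int) (x : Int) :
    PySem.Set.contains (PySem.Set.diff (PySem.Set.ofList n) [v]) x = true ↔ (x ∈ n ∧ x ≠ v) := by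
  rw [PySem.Set.contains_iff, PySem.Set.mem_diff, PySem.Set.mem_ofList]
  simp

-- the crux: a colliding neighbor pair exists iff a colliding edge exists
theorem pvExists_iff (v1 v2 : Int) (n1 n2 : List Int) (ce : List (List Int)) :
    (n1.any (pvHitPair v1 v2 n2 ce) = true)
      ↔ (ce.any (pvHitEdge (PySem.Set.diff (PySem.Set.ofList n1) [v2])
                           (PySem.Set.diff (PySem.Set.ofList n2) [v1])) = true) := by
  constructor
  · intro h
    rcases List.any_eq_true.mp h with ⟨w1, hw1, hp⟩
    unfold pvHitPair at hp
    rw [Bool.and_eq_true] at hp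
    obtain ⟨hne1, hany⟩ := hp
    rcases List.any_eq_true.mp hany with ⟨w2, hw2, hp2⟩
    rw [Bool.and_eq_true] at hp2
    obtain ⟨hne2, hmem⟩ := hp2
    have hne1' : w1 ≠ v2 := of_decide_eq_true hne1
    have hne2' : w2 ≠ v1 := of_decide_eq_true hne2
    have hmem' := of_decide_eq_true hmem
    rw [pvSorted_pair] at hmem'
    by_cases hle : w1 ≤ w2
    · rw [if_pos hle] at hmem'
      refine List.any_eq_true.mpr ⟨[w1, w2], hmem', ?_⟩
      simp [pvHitEdge, hle]
      exact Or.inl ⟨⟨hw1, hne1'⟩, hw2, hne2'⟩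
    · rw [if_neg hle] at hmem'
      have hle2 : w2 ≤ w1 := le_of_lt (lt_of_not_ge hle)
      refine List.any_eq_true.mpr ⟨[w2, w1], hmem', ?_⟩
      simp [pvHitEdge, hle2]
      exact Or.inr ⟨⟨hw1, hne1'⟩, hw2, hne2'⟩
  · intro h
    rcases List.any_eq_true.mp h with ⟨e, he, hp⟩
    match e with
    | [x, y] =>
      unfold pvHitEdge at hp
      rw [Bool.and_eq_true] at hp
      obtain ⟨hle, hor⟩ := hp
      have hle' : x ≤ y := by simpa using hle
      rw [Bool.or_eq_true] at hor
      rcases hor with hc | hc <;> (rw [Bool.and_eq_true] at hc; obtain ⟨hc1, hc2⟩ := hc)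
      · rcases (pvMem_s1 v2 n1 x).mp hc1 with ⟨hx, hxne⟩
        rcases (pvMem_s1 v1 n2 y).mp hc2 with ⟨hy, hyne⟩
        refine List.any_eq_true.mpr ⟨x, hx, ?_⟩
        unfold pvHitPair
        rw [Bool.and_eq_true]
        refine ⟨by simpa using hxne, ?_⟩
        refine List.any_eq_true.mpr ⟨y, hy, ?_⟩
        rw [Bool.and_eq_true]
        refine ⟨by simpa using hyne, ?_⟩
        rw [pvSorted_pair, if_pos hle']
        simpa using he
      · rcases (pvMem_s1 v2 n1 y).mp hc1 with ⟨hy, hyne⟩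
        rcases (pvMem_s1 v1 n2 x).mp hc2 with ⟨hx, hxne⟩
        refine List.any_eq_true.mpr ⟨y, hy, ?_⟩
        unfold pvHitPair
        rw [Bool.and_eq_true]
        refine ⟨by simpa using hyne, ?_⟩
        refine List.any_eq_true.mpr ⟨x, hx, ?_⟩
        rw [Bool.and_eq_true]
        refine ⟨by simpa using hxne, ?_⟩
        rw [pvSorted_pair]
        by_cases hyx : y ≤ x
        · have hxy : x = y := le_antisymm hle' hyx
          subst hxy
          simpa using he
        · simpa [hyx] using he

-- ===== VERDICT (by name: the statement is the Claim_ definition above) =====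
theorem check_third_cond_spec : Claim_equal_check_third_cond := by
  intro v1 v2 n1 n2 ce _
  unfold Spec_check_third_cond check_third_cond_alt
  rw [pvA_eq, pvLoopB_eq]
  congr 1
  exact Bool.coe_iff_coe.mp (pvExists_iff v1 v2 n1 n2 ce)
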